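-- pv_equiv track=rewrite | github.com/mcclee/leetcode | 29_divide.py | findmaxtens
-- ===== SOURCE A (Python) =====
-- def findmaxtens(num, div):
--     n = str(num)
--     d = str(div)
--     dis = len(n)-len(d)
--     tims = '1'
--     if dis > 0:
--         i = 0
--         while dis > i:
--             d = d + '0'
--             tims = tims + '0'
--             i += 1
--         if int(d) > num:
--             d = d[:-1]
--             tims = tims[:-1]
--     m = int(d)
--     t = int(tims)
--     while m + int(d) < num:
--         m += int(d)
--         t += int(tims)
--     return m, t
-- ===== SOURCE B (Python) =====
-- def findmaxtens(num, div):
--     d = str(div)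
--     dis = len(str(num)) - len(d)
--     tims = '1'
--     if dis > 0:
--         d += '0' * dis
--         tims += '0' * dis
--         if int(d) > num:
--             d = d[:-1]
--             tims = tims[:-1]
--     step = int(d)
--     count = max(1, (num - 1) // step)
--     return step * count, int(tims) * count
-- ===== Notes on version B (the rewrite author's own statement) =====
-- stated objective: simpler
-- what changed: The zero-appending while loop becomes a single string repetition and the accumulation while loop (m += int(d); t += int(tims)) is replaced by the closed-form repeat count max(1, (num-1)//int(d)), so B returns (step*count, tims*count) with no loops at all.
-- outside the precondition, e.g. on findmaxtens(-5, 0): A returns (0, 1), B raises ZeroDivisionError; on findmaxtens(-8, -4): A returns (-4, 1), B returns (-8, 2)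
import Mathlib
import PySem

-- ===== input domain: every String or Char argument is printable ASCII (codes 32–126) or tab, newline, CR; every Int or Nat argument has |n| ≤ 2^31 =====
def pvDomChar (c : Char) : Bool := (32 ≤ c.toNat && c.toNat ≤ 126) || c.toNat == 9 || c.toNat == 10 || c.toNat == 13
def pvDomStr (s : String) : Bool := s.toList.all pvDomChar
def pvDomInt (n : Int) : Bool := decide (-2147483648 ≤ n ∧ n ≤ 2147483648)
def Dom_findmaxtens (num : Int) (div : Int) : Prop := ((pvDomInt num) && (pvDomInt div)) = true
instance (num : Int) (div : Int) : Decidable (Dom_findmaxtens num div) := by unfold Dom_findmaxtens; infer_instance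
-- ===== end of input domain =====

-- B replaces A's two while loops by a string repetition and a closed-form repeat count; objective: simpler.
-- Python strings are represented by their List Char (PySem.Chars/List primitives are the String ones on toList).

-- ===== PORT A =====
-- the zero-appending loop: while dis > i: d += '0'; tims += '0'; i += 1
def pvLoopScale (dis : Int) (i : Int) (d : List Char) (tims : List Char) : List Char × List Char :=
  if dis > i then pvLoopScale dis (i + 1) (d ++ ['0']) (tims ++ ['0']) else (d, tims)
termination_by (dis - i).toNat
decreasing_by omega

-- the accumulation loop: while m + int(d) < num: m += int(d); t += int(tims)
-- (the conjunct 1 ≤ int(d) only makes the recursion total; Python's condition is m + int(d) < num)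
def pvLoopSum (num : Int) (d : List Char) (tims : List Char) (m : Int) (t : Int) : Int × Int :=
  if 1 ≤ (PySem.Int.ofChars? d).getD 0 ∧ m + (PySem.Int.ofChars? d).getD 0 < num then
    pvLoopSum num d tims (m + (PySem.Int.ofChars? d).getD 0) (t + (PySem.Int.ofChars? tims).getD 0)
  else (m, t)
termination_by (num - m).toNat
decreasing_by omega

def findmaxtens (num : Int) (div : Int) : Int × Int :=
  let n := PySem.Int.toChars num
  let d := PySem.Int.toChars div
  let dis := PySem.Chars.len n - PySem.Chars.len d
  let tims := ['1']
  let p :=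
    if dis > 0 then
      let q := pvLoopScale dis 0 d tims
      if (PySem.Int.ofChars? q.1).getD 0 > num then
        (PySem.List.slice q.1 none (some (-1)), PySem.List.slice q.2 none (some (-1)))
      else q
    else (d, tims)
  pvLoopSum num p.1 p.2 ((PySem.Int.ofChars? p.1).getD 0) ((PySem.Int.ofChars? p.2).getD 0)

-- ===== PORT B =====
def findmaxtens_alt (num : Int) (div : Int) : Int × Int :=
  let d0 := PySem.Int.toChars div
  let dis := PySem.Chars.len (PySem.Int.toChars num) - PySem.Chars.len d0
  let p :=
    if dis > 0 then
      let d1 := d0 ++ List.replicate dis.toNat '0'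
      let t1 := ['1'] ++ List.replicate dis.toNat '0'
      if (PySem.Int.ofChars? d1).getD 0 > num then
        (PySem.List.slice d1 none (some (-1)), PySem.List.slice t1 none (some (-1)))
      else (d1, t1)
    else (d0, ['1'])
  let step := (PySem.Int.ofChars? p.1).getD 0
  let count := max 1 (PySem.Int.floordiv (num - 1) step)
  (step * count, (PySem.Int.ofChars? p.2).getD 0 * count)

-- ===== PRECONDITION & SPEC =====
-- Pre_ excludes div ≤ 0, outside the function's natural domain: there A's accumulation loop
-- diverges on most inputs (e.g. num = 1, div = 0), and on the few where it returns B's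
-- integer division raises (div = 0) or gives a different value.
def Pre_findmaxtens (num : Int) (div : Int) : Prop := 1 ≤ div
instance (num : Int) (div : Int) : Decidable (Pre_findmaxtens num div) := by unfold Pre_findmaxtens; infer_instance
def pvWitness_findmaxtens : Int × Int := (12345, 17)

def Spec_findmaxtens (num : Int) (div : Int) (out : Int × Int) : Prop := out = findmaxtens_alt num div
instance (num : Int) (div : Int) (out : Int × Int) : Decidable (Spec_findmaxtens num div out) := by unfold Spec_findmaxtens; infer_instance

-- ===== CLAIM (what is proved, stated in full; the proofs are below) =====
def Claim_equal_findmaxtens : Prop := ∀ (num : Int) (div : Int), Dom_findmaxtens num div → Pre_findmaxtens num div → Spec_findmaxtens num div (findmaxtens num div)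

-- ===== LEMMAS AND PROOFS =====

-- the scaling loop appends exactly (dis - i) zeros to both strings
theorem pvLoopScale_eq (dis i : Int) (d tims : List Char) :
    pvLoopScale dis i d tims =
      (d ++ List.replicate (dis - i).toNat '0', tims ++ List.replicate (dis - i).toNat '0') := by
  fun_induction pvLoopScale dis i d tims with
  | case1 i d tims h ih =>
    rw [ih]
    have hk : (dis - i).toNat = (dis - (i + 1)).toNat + 1 := by omega
    simp [hk, List.replicate_succ, List.append_assoc]
  | case2 i d tims h =>
    have hk : (dis - i).toNat = 0 := by omega
    simp [hk]

-- str(n) for n ≥ 0 contains no '-'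
theorem pv_digitChar_ne_minus (k : Nat) (hk : k < 10) : Nat.digitChar k ≠ '-' := by
  interval_cases k <;> decide

theorem pv_no_minus_toDigits (n : Nat) : '-' ∉ Nat.toDigits 10 n := by
  induction n using Nat.strong_induction_on with
  | _ n ih =>
    rw [Nat.toDigits_eq_if (by norm_num)]
    split
    · next h10 =>
      intro hmem
      exact pv_digitChar_ne_minus n h10 (List.mem_singleton.mp hmem).symm
    · next h10 =>
      intro hmem
      rcases List.mem_append.mp hmem with h | h
      · exact ih (n / 10) (by omega) h
      · exact pv_digitChar_ne_minus (n % 10) (Nat.mod_lt _ (by norm_num))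
          (List.mem_singleton.mp h).symm

theorem pv_no_minus_toChars (v : Int) (hv : 0 ≤ v) : '-' ∉ PySem.Int.toChars v := by
  unfold PySem.Int.toChars
  rw [if_neg (by omega)]
  exact pv_no_minus_toDigits _

-- any value int() can return on a string without '-' is nonnegative (0 if it raises)
theorem pv_parse_branch_nonneg (o : Option Nat) :
    0 ≤ (Option.map (fun n : Int => n) (do let a ← o; pure ((a : Int)))).getD 0 := by
  cases o <;> simp

theorem pv_ofChars_getD_nonneg (cs : List Char) (h : '-' ∉ cs) :
    0 ≤ (PySem.Int.ofChars? cs).getD 0 := by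
  have hsub : ∀ c : Char,
      c ∈ (List.dropWhile PySem.Int.isIntSpace
            (List.dropWhile PySem.Int.isIntSpace cs).reverse).reverse → c ∈ cs := by
    intro c hc
    rw [List.mem_reverse] at hc
    have hc2 := (List.dropWhile_sublist _).mem hc
    rw [List.mem_reverse] at hc2
    exact (List.dropWhile_sublist _).mem hc2
  unfold PySem.Int.ofChars?
  dsimp only
  split
  · next heq =>
    exact absurd (hsub '-' (heq ▸ List.mem_cons_self)) h
  · next => exact pv_parse_branch_nonneg _
  · next => exact pv_parse_branch_nonneg _

-- closed form of the accumulation loop when the step is positive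
theorem pvLoopSum_closed (num : Int) (d tims : List Char)
    (hD : 1 ≤ (PySem.Int.ofChars? d).getD 0) (m t : Int) :
    pvLoopSum num d tims m t =
      (m + (PySem.Int.ofChars? d).getD 0 * max 0 ((num - m - 1) / (PySem.Int.ofChars? d).getD 0),
       t + (PySem.Int.ofChars? tims).getD 0 * max 0 ((num - m - 1) / (PySem.Int.ofChars? d).getD 0)) := by
  fun_induction pvLoopSum num d tims m t with
  | case1 m t h ih =>
    set D := (PySem.Int.ofChars? d).getD 0 with hDdef
    set T := (PySem.Int.ofChars? tims).getD 0 with hTdef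
    rw [ih]
    have hlt : m + D < num := h.2
    have hstep : (num - (m + D) - 1) = (num - m - 1) + (-1) * D := by ring
    have hdiv : (num - (m + D) - 1) / D = (num - m - 1) / D - 1 := by
      rw [hstep, Int.add_mul_ediv_right _ _ (by omega : D ≠ 0)]; ring
    have hq1 : 1 ≤ (num - m - 1) / D := by
      rw [Int.le_ediv_iff_mul_le (by omega : (0:Int) < D)]; omega
    set q := (num - m - 1) / D with hqdef
    rw [hdiv]
    have h1 : max 0 (q - 1) = q - 1 := by omega
    have h2 : max 0 q = q := by omega
    rw [h1, h2, Prod.mk.injEq]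
    exact ⟨by ring, by ring⟩
  | case2 m t h =>
    set D := (PySem.Int.ofChars? d).getD 0 with hDdef
    have hge : num ≤ m + D := by
      by_contra hc
      exact h ⟨hD, by omega⟩
    have hq : (num - m - 1) / D < 1 := by
      rw [Int.ediv_lt_iff_lt_mul (by omega : (0:Int) < D)]; omega
    have h0 : max 0 ((num - m - 1) / D) = 0 := by omega
    rw [h0]
    simp

-- the accumulation loop started at (int(d), int(tims)) equals B's closed form
theorem pvBridge (num : Int) (d tims : List Char) (h : '-' ∉ d) :
    pvLoopSum num d tims ((PySem.Int.ofChars? d).getD 0) ((PySem.Int.ofChars? tims).getD 0) =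
      ((PySem.Int.ofChars? d).getD 0 *
         max 1 (PySem.Int.floordiv (num - 1) ((PySem.Int.ofChars? d).getD 0)),
       (PySem.Int.ofChars? tims).getD 0 *
         max 1 (PySem.Int.floordiv (num - 1) ((PySem.Int.ofChars? d).getD 0))) := by
  have hD0 : 0 ≤ (PySem.Int.ofChars? d).getD 0 := pv_ofChars_getD_nonneg d h
  rcases eq_or_lt_of_le hD0 with hz | hpos
  · -- step = 0: the loop guard is false at once; B's count is max 1 0 = 1
    rw [pvLoopSum]
    rw [if_neg (by omega)]
    rw [← hz]
    simp [PySem.Int.floordiv, Int.fdiv_zero]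
  · have hD : 1 ≤ (PySem.Int.ofChars? d).getD 0 := hpos
    rw [pvLoopSum_closed num d tims hD]
    set D := (PySem.Int.ofChars? d).getD 0 with hDdef
    set T := (PySem.Int.ofChars? tims).getD 0 with hTdef
    rw [PySem.Int.floordiv_eq_ediv_of_pos (by omega : (0:Int) < D)]
    have hstep : (num - D - 1) = (num - 1) + (-1) * D := by ring
    have hdiv : (num - D - 1) / D = (num - 1) / D - 1 := by
      rw [hstep, Int.add_mul_ediv_right _ _ (by omega : D ≠ 0)]; ring
    rw [hdiv]
    set q := (num - 1) / D with hqdef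
    rcases le_or_gt q 0 with hq | hq
    · have h1 : max 0 (q - 1) = 0 := by omega
      have h2 : max 1 q = 1 := by omega
      rw [h1, h2]; simp
    · have h1 : max 0 (q - 1) = q - 1 := by omega
      have h2 : max 1 q = q := by omega
      rw [h1, h2, Prod.mk.injEq]
      exact ⟨by ring, by ring⟩

-- ===== VERDICT (by name: the statement is the Claim_ definition above) =====
theorem findmaxtens_spec : Claim_equal_findmaxtens := by
  intro num div hdom hpre
  unfold Spec_findmaxtens findmaxtens findmaxtens_alt
  have hpre' : (1:Int) ≤ div := hpre
  dsimp only
  rw [pvLoopScale_eq]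
  have hrep : (PySem.Chars.len (PySem.Int.toChars num) - PySem.Chars.len (PySem.Int.toChars div) - 0) =
      PySem.Chars.len (PySem.Int.toChars num) - PySem.Chars.len (PySem.Int.toChars div) := by ring
  rw [hrep]
  have hd0 : '-' ∉ PySem.Int.toChars div := pv_no_minus_toChars div (by omega)
  have hz : ∀ k : Nat, '-' ∉ (List.replicate k '0' : List Char) := by
    intro k hk
    rcases List.eq_of_mem_replicate hk with h
    simp at h
  refine pvBridge num _ _ ?_
  -- '-' does not occur in the scaled/truncated digit string
  split
  · split
    · simp only []
      rw [PySem.List.slice_to_neg_one]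
      intro hmem
      have := (List.dropLast_sublist _).mem hmem
      rcases List.mem_append.mp this with h | h
      · exact hd0 h
      · exact hz _ h
    · intro hmem
      rcases List.mem_append.mp hmem with h | h
      · exact hd0 h
      · exact hz _ h
  · exact hd0
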